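-- pv_equiv track=rewrite | github.com/553574842-sys/resume-master | resume_generator.py | experience_classifier
-- ===== SOURCE A (Python) =====
-- from typing import Dict, List, Tuple
--
-- def _match_score(line: str, keywords: List[str]) -> int:
--     lowered = line.lower()
--     score = 0
--     for kw in keywords:
--         if kw.lower() in lowered or kw in line:
--             score += 1
--     return score
--
-- def experience_classifier(work_lines: List[str], jd_keywords: List[str]) -> Dict[str, List[str]]:
--     scored: List[Tuple[int, str]] = [(_match_score(line, jd_keywords), line) for line in work_lines]
--     scored.sort(key=lambda x: x[0], reverse=True)
--
--     direct = [line for score, line in scored if score >= 2]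
--     indirect = [line for score, line in scored if 0 < score < 2]
--     standard = [line for score, line in scored if score == 0]
--     return {
--         "direct_experience": direct,
--         "indirect_experience": indirect,
--         "standard_capability": standard,
--     }
-- ===== SOURCE B (Python) =====
-- from typing import Dict, List
--
-- def experience_classifier(work_lines: List[str], jd_keywords: List[str]) -> Dict[str, List[str]]:
--     # Bucket lines by exact match score (insertion order preserves input order,
--     # mirroring the stable reverse sort), then read the buckets out: no sort,
--     # one grouping pass instead of sort + three filter passes; keyword lowering
--     # is hoisted out of the per-line loop.
--     kw_pairs = [(kw, kw.lower()) for kw in jd_keywords]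
--     buckets: Dict[int, List[str]] = {}
--     for line in work_lines:
--         lowered = line.lower()
--         score = 0
--         for kw, kl in kw_pairs:
--             if kl in lowered or kw in line:
--                 score += 1
--         buckets.setdefault(score, []).append(line)
--     direct: List[str] = []
--     for s in range(len(jd_keywords), 1, -1):
--         direct.extend(buckets.get(s, []))
--     return {
--         "direct_experience": direct,
--         "indirect_experience": buckets.get(1, []),
--         "standard_capability": buckets.get(0, []),
--     }
-- ===== Notes on version B (the rewrite author's own statement) =====
-- stated objective: alternative
-- what changed: Replaces the stable reverse sort plus three filter passes by a single bucketing pass keyed by exact score (dict insertion order preserves input order, matching the stable sort), reading the buckets out in descending score order, with keyword lowercasing hoisted out of the per-line loop.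
import Mathlib
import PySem

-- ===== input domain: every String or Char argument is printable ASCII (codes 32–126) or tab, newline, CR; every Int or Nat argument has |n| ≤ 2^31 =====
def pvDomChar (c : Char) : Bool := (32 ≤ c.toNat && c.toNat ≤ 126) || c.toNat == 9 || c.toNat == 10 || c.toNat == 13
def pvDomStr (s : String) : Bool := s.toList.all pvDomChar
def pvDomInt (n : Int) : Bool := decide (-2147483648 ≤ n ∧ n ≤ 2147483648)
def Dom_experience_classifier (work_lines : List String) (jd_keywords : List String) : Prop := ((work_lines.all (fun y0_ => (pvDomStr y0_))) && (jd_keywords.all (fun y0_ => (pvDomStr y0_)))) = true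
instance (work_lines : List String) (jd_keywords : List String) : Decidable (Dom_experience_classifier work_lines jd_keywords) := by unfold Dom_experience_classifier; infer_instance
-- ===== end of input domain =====

-- B replaces A's stable reverse sort + three filter passes by one bucketing pass keyed by score
-- (buckets read out in descending score order), with keyword lowercasing hoisted out of the per-line loop.

-- ===== PORT A =====
-- _match_score(line, keywords)
def matchScoreA (line : String) (keywords : List String) : Int :=
  let lowered := PySem.Str.lower line
  keywords.foldl (fun score kw =>
    if PySem.Str.isIn (PySem.Str.lower kw) lowered || PySem.Str.isIn kw line then score + 1 else score) 0

def experience_classifier (work_lines : List String) (jd_keywords : List String) : List (String × List String) :=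
  let scored := work_lines.map (fun line => (matchScoreA line jd_keywords, line))
  let ss := PySem.List.sorted scored (fun x => x.1) true
  let direct := (ss.filter (fun x => decide (2 ≤ x.1))).map (fun x => x.2)
  let indirect := (ss.filter (fun x => decide (0 < x.1) && decide (x.1 < 2))).map (fun x => x.2)
  let standard := (ss.filter (fun x => x.1 == 0)).map (fun x => x.2)
  [("direct_experience", direct), ("indirect_experience", indirect), ("standard_capability", standard)]

-- ===== PORT B =====
-- the inner scoring loop of Source B, over the precomputed (kw, kw.lower()) pairs
def bScore (line : String) (kwPairs : List (String × String)) : Int :=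
  let lowered := PySem.Str.lower line
  kwPairs.foldl (fun score p =>
    if PySem.Str.isIn p.2 lowered || PySem.Str.isIn p.1 line then score + 1 else score) 0

def experience_classifier_alt (work_lines : List String) (jd_keywords : List String) : List (String × List String) :=
  let kwPairs := jd_keywords.map (fun kw => (kw, PySem.Str.lower kw))
  let buckets := work_lines.foldl (fun (d : PySem.Dict Int (List String)) line =>
    let s := bScore line kwPairs
    d.insert s (d.getD s [] ++ [line])) PySem.Dict.empty
  let direct := (PySem.List.pyRange (jd_keywords.length : Int) 1 (-1)).foldl
    (fun acc s => acc ++ buckets.getD s []) []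
  [("direct_experience", direct),
   ("indirect_experience", buckets.getD 1 []),
   ("standard_capability", buckets.getD 0 [])]

-- ===== PRECONDITION & SPEC =====
def Spec_experience_classifier (work_lines : List String) (jd_keywords : List String) (out : List (String × List String)) : Prop := out = experience_classifier_alt work_lines jd_keywords
instance (work_lines : List String) (jd_keywords : List String) (out : List (String × List String)) : Decidable (Spec_experience_classifier work_lines jd_keywords out) := by unfold Spec_experience_classifier; infer_instance

-- ===== CLAIM (what is proved, stated in full; the proofs are below) =====
def Claim_equal_experience_classifier : Prop := ∀ (work_lines : List String) (jd_keywords : List String), Dom_experience_classifier work_lines jd_keywords → Spec_experience_classifier work_lines jd_keywords (experience_classifier work_lines jd_keywords)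

-- ===== LEMMAS AND PROOFS =====

-- B's score over the precomputed pairs is A's score
lemma bScore_eq (line : String) (kws : List String) :
    bScore line (kws.map (fun kw => (kw, PySem.Str.lower kw))) = matchScoreA line kws := by
  simp [bScore, matchScoreA, List.foldl_map]

lemma score_foldl_bounds (line : String) (lowered : String) (kws : List String) :
    ∀ a : Int, a ≤ kws.foldl (fun score kw =>
      if PySem.Str.isIn (PySem.Str.lower kw) lowered || PySem.Str.isIn kw line then score + 1 else score) a ∧
      kws.foldl (fun score kw =>
      if PySem.Str.isIn (PySem.Str.lower kw) lowered || PySem.Str.isIn kw line then score + 1 else score) a ≤ a + kws.length := by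
  induction kws with
  | nil => simp
  | cons k t ih =>
    intro a
    simp only [List.foldl_cons, List.length_cons]
    rcases ih (if PySem.Str.isIn (PySem.Str.lower k) lowered || PySem.Str.isIn k line then a + 1 else a) with ⟨h1, h2⟩
    constructor
    · refine le_trans ?_ h1; split <;> omega
    · refine le_trans h2 ?_; split <;> [push_cast; push_cast] <;> omega

-- the score is between 0 and the number of keywords
lemma matchScoreA_bounds (line : String) (kws : List String) :
    0 ≤ matchScoreA line kws ∧ matchScoreA line kws ≤ (kws.length : Int) := by
  have := score_foldl_bounds line (PySem.Str.lower line) kws 0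
  simpa [matchScoreA] using this

-- stable insertion keeps descending order
lemma insertBy_pairwise (x : Int × String) (ys : List (Int × String))
    (h : ys.Pairwise (fun a b => b.1 ≤ a.1)) :
    (PySem.List.insertBy (fun a b => decide (b.1 < a.1)) x ys).Pairwise (fun a b => b.1 ≤ a.1) := by
  induction ys with
  | nil => simp [PySem.List.insertBy]
  | cons y t ih =>
    rcases List.pairwise_cons.mp h with ⟨hy, ht⟩
    by_cases hb : y.1 < x.1
    · rw [show PySem.List.insertBy (fun a b => decide (b.1 < a.1)) x (y :: t)
          = x :: y :: t by simp [PySem.List.insertBy, hb]]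
      refine List.pairwise_cons.mpr ⟨?_, h⟩
      intro z hz
      rcases List.mem_cons.mp hz with rfl | hz
      · omega
      · have := hy z hz; omega
    · rw [show PySem.List.insertBy (fun a b => decide (b.1 < a.1)) x (y :: t)
          = y :: PySem.List.insertBy (fun a b => decide (b.1 < a.1)) x t by simp [PySem.List.insertBy, hb]]
      refine List.pairwise_cons.mpr ⟨?_, ih ht⟩
      intro z hz
      rcases (PySem.List.mem_insertBy _ _ _ _).mp hz with rfl | hz
      · omega
      · exact hy z hz

-- inserting into a descending list appends x after all elements of its own score class
lemma insertBy_filter (c : Int) (x : Int × String) (ys : List (Int × String))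
    (h : ys.Pairwise (fun a b => b.1 ≤ a.1)) :
    (PySem.List.insertBy (fun a b => decide (b.1 < a.1)) x ys).filter (fun z => z.1 == c) =
      ys.filter (fun z => z.1 == c) ++ (if x.1 == c then [x] else []) := by
  induction ys with
  | nil => simp [PySem.List.insertBy]; split <;> simp_all
  | cons y t ih =>
    rcases List.pairwise_cons.mp h with ⟨hy, ht⟩
    by_cases hb : y.1 < x.1
    · rw [show PySem.List.insertBy (fun a b => decide (b.1 < a.1)) x (y :: t)
          = x :: y :: t by simp [PySem.List.insertBy, hb]]
      by_cases hc : x.1 = c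
      · have hnil : (y :: t).filter (fun z => z.1 == c) = [] := by
          rw [List.filter_eq_nil_iff]
          intro z hz
          rcases List.mem_cons.mp hz with rfl | hz
          · simp; omega
          · have := hy z hz; simp; omega
        simp [hc, hnil]
      · simp [List.filter_cons, hc]
    · rw [show PySem.List.insertBy (fun a b => decide (b.1 < a.1)) x (y :: t)
          = y :: PySem.List.insertBy (fun a b => decide (b.1 < a.1)) x t by simp [PySem.List.insertBy, hb]]
      rw [List.filter_cons, List.filter_cons, ih ht]
      by_cases hyc : y.1 = c <;> simp [hyc]

-- folding insertions: each score class accumulates in input order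
lemma foldl_insertBy_filter (c : Int) (xs : List (Int × String)) :
    ∀ acc : List (Int × String), acc.Pairwise (fun a b => b.1 ≤ a.1) →
    (xs.foldl (fun acc x => PySem.List.insertBy (fun a b => decide (b.1 < a.1)) x acc) acc).filter
        (fun z => z.1 == c) =
      acc.filter (fun z => z.1 == c) ++ xs.filter (fun z => z.1 == c) := by
  induction xs with
  | nil => intro acc _; simp
  | cons x t ih =>
    intro acc hacc
    rw [List.foldl_cons, ih _ (insertBy_pairwise x acc hacc), insertBy_filter c x acc hacc,
        List.filter_cons]
    by_cases hc : x.1 = c <;> simp [hc]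

-- STABILITY: each score class of the reverse-sorted list is that class of the input, in order
lemma sorted_filter_eq (c : Int) (xs : List (Int × String)) :
    (PySem.List.sorted xs (fun x => x.1) true).filter (fun z => z.1 == c) =
      xs.filter (fun z => z.1 == c) := by
  rw [PySem.List.sorted_rev_eq_foldl_insertBy]
  simpa using foldl_insertBy_filter c xs [] (by simp)

lemma pyRange_down_nil (n : Int) (h : n ≤ 1) : PySem.List.pyRange n 1 (-1) = [] := by
  have : ¬ ((1:Int) < n) := by omega
  simp [PySem.List.pyRange, this]

lemma pyRange_down_eq (n : Int) (h : 1 < n) :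
    PySem.List.pyRange n 1 (-1) = (List.range (n-1).toNat).map (fun k : Nat => n - (k : Int)) := by
  simp only [PySem.List.pyRange, if_neg (by norm_num : ¬((-1:Int) = 0)),
    if_neg (by norm_num : ¬((0:Int) < -1)), if_pos h]
  have he : (n - 1 + -(-1) - 1) / -(-1) = n - 1 := by norm_num
  rw [he]
  apply List.map_congr_left
  intro k _
  ring

lemma pyRange_down_cons (n : Nat) (h : 2 ≤ n) :
    PySem.List.pyRange (n : Int) 1 (-1) = (n : Int) :: PySem.List.pyRange ((n - 1 : Nat) : Int) 1 (-1) := by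
  rw [pyRange_down_eq (n : Int) (by exact_mod_cast h)]
  have h2 : ((n:Int) - 1).toNat = (n - 1 : Nat) := by omega
  rw [h2]
  obtain ⟨m, hm1⟩ : ∃ m, n - 1 = m + 1 := ⟨n - 2, by omega⟩
  rw [hm1, List.range_succ_eq_map, List.map_cons]
  rw [show ((n:Int) - ((0:Nat):Int)) = (n:Int) by push_cast; ring]
  congr 1
  by_cases hm : 1 < ((m + 1 : Nat) : Int)
  · rw [pyRange_down_eq _ hm]
    have h3 : (((m+1 : Nat):Int) - 1).toNat = m := by omega
    rw [h3, List.map_map]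
    apply List.map_congr_left
    intro k _
    simp only [Function.comp]
    push_cast [Nat.succ_eq_add_one]
    omega
  · have hm0 : m = 0 := by omega
    subst hm0
    rw [pyRange_down_nil _ (by norm_num)]
    simp

-- in a descending list, the top score class is a prefix of the ≥2 selection
lemma filter_split_top (m : Int) (hm : 2 ≤ m) (L : List (Int × String))
    (h : L.Pairwise (fun a b => b.1 ≤ a.1)) :
    L.filter (fun x => decide (2 ≤ x.1) && decide (x.1 ≤ m)) =
      L.filter (fun x => x.1 == m) ++ L.filter (fun x => decide (2 ≤ x.1) && decide (x.1 ≤ m - 1)) := by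
  induction L with
  | nil => simp
  | cons y t ih =>
    rcases List.pairwise_cons.mp h with ⟨hy, ht⟩
    rw [List.filter_cons, List.filter_cons, List.filter_cons]
    by_cases h1 : y.1 = m
    · simp only [h1, beq_self_eq_true, if_true,
        if_pos (by simp; omega : (decide (2 ≤ m) && decide (m ≤ m)) = true),
        if_neg (by simp : ¬ ((decide (2 ≤ m) && decide (m ≤ m - 1)) = true))]
      rw [ih ht]
      simp
    · by_cases h2 : 2 ≤ y.1 ∧ y.1 ≤ m - 1
      · have hnil : t.filter (fun x => x.1 == m) = [] := by
          rw [List.filter_eq_nil_iff]; intro z hz; have := hy z hz; simp; omega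
        rw [if_pos (by simp; omega), if_neg (by simp; omega), if_pos (by simp; omega), ih ht]
        rw [show t.filter (fun x => x.1 == m) = [] from hnil]
        simp
      · rw [if_neg (by simp; omega), if_neg (by simp; omega), if_neg (by simp; omega)]
        exact ih ht

-- GROUPING: the ≥2 selection of a descending list is its score classes K, K-1, …, 2 concatenated
lemma filter_ge2_eq_flatMap (K : Nat) (L : List (Int × String))
    (h : L.Pairwise (fun a b => b.1 ≤ a.1)) :
    L.filter (fun x => decide (2 ≤ x.1) && decide (x.1 ≤ (K : Int))) =
      (PySem.List.pyRange (K : Int) 1 (-1)).flatMap (fun s => L.filter (fun x => x.1 == s)) := by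
  induction K generalizing L with
  | zero =>
    rw [pyRange_down_nil _ (by norm_num)]
    simp only [List.flatMap_nil]
    rw [List.filter_eq_nil_iff]; intro z _; simp; omega
  | succ n ih =>
    by_cases hn : 2 ≤ n + 1
    · rw [pyRange_down_cons (n+1) hn, List.flatMap_cons]
      have hstep : ((n + 1 : Nat) : Int) - 1 = ((n + 1 - 1 : Nat) : Int) := by push_cast; omega
      rw [filter_split_top ((n+1 : Nat) : Int) (by exact_mod_cast hn) L h]
      congr 1
      rw [hstep, show (n + 1 - 1 : Nat) = n from rfl] at *
      exact ih L h
    · have hn1 : n = 0 := by omega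
      subst hn1
      rw [pyRange_down_nil _ (by norm_num)]
      simp only [List.flatMap_nil]
      rw [List.filter_eq_nil_iff]; intro z _; simp; omega

-- the bucket of score s collects exactly the lines of score s, in input order
lemma buckets_getD (kws : List String) (xs : List String) (s : Int) :
    ∀ d : PySem.Dict Int (List String),
    PySem.Dict.getD (xs.foldl (fun d line =>
        d.insert (bScore line (kws.map (fun kw => (kw, PySem.Str.lower kw))))
          (d.getD (bScore line (kws.map (fun kw => (kw, PySem.Str.lower kw)))) [] ++ [line])) d) s [] =
      PySem.Dict.getD d s [] ++ xs.filter (fun line => matchScoreA line kws == s) := by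
  induction xs with
  | nil => intro d; simp
  | cons x t ih =>
    intro d
    rw [List.foldl_cons, ih, List.filter_cons]
    simp only [bScore_eq]
    rw [PySem.Dict.getD_insert]
    by_cases hc : s = matchScoreA x kws
    · rw [if_pos hc, if_pos (by simp [hc])]
      simp [hc]
    · rw [if_neg hc, if_neg (by simp; omega)]

lemma getD_empty (s : Int) :
    PySem.Dict.getD (PySem.Dict.empty : PySem.Dict Int (List String)) s [] = [] := by
  simp [PySem.Dict.getD, PySem.Dict.empty, PySem.Dict.get?]

-- 0 < n < 2 on Int is n == 1
lemma indirect_cond (n : Int) : (decide (0 < n) && decide (n < 2)) = (n == 1) := by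
  rcases eq_or_ne n 1 with h | h
  · simp [h]
  · have h1 : (n == 1) = false := by simpa using h
    rw [h1]
    rcases lt_or_ge n 1 with h2 | h2
    · simp only [Bool.and_eq_false_iff]; left; simpa using (by omega : ¬ 0 < n)
    · simp only [Bool.and_eq_false_iff]; right; simpa using (by omega : ¬ n < 2)

-- each score class of A's sorted list, projected to lines, is the class of the input lines
lemma class_eq (wl kws : List String) (c : Int) :
    ((PySem.List.sorted (wl.map (fun l => (matchScoreA l kws, l))) (fun x => x.1) true).filter
        (fun z => z.1 == c)).map (fun x => x.2) =
      wl.filter (fun l => matchScoreA l kws == c) := by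
  rw [sorted_filter_eq, List.filter_map, List.map_map]
  show List.map (fun l => l) _ = _
  rw [List.map_id']
  rfl

-- ===== VERDICT (by name: the statement is the Claim_ definition above) =====
theorem experience_classifier_spec : Claim_equal_experience_classifier := by
  intro wl kws _
  unfold Spec_experience_classifier experience_classifier experience_classifier_alt
  have hbuck : ∀ c : Int,
      PySem.Dict.getD (wl.foldl (fun (d : PySem.Dict Int (List String)) line =>
        d.insert (bScore line (kws.map (fun kw => (kw, PySem.Str.lower kw))))
          (d.getD (bScore line (kws.map (fun kw => (kw, PySem.Str.lower kw)))) [] ++ [line])) PySem.Dict.empty) c [] =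
      wl.filter (fun l => matchScoreA l kws == c) := by
    intro c
    rw [buckets_getD, getD_empty, List.nil_append]
  have hpair : (PySem.List.sorted (wl.map (fun l => (matchScoreA l kws, l))) (fun x => x.1) true).Pairwise
      (fun a b => b.1 ≤ a.1) := PySem.List.sorted_pairwise_rev _ _
  refine congrArg₂ _ (congrArg _ ?_) (congrArg₂ _ (congrArg _ ?_) (congrArg₂ _ (congrArg _ ?_) rfl))
  · -- direct
    rw [PySem.List.foldl_append_eq_flatMap, List.nil_append]
    have hcong : (PySem.List.sorted (wl.map (fun l => (matchScoreA l kws, l))) (fun x => x.1) true).filter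
          (fun x => decide (2 ≤ x.1)) =
        (PySem.List.sorted (wl.map (fun l => (matchScoreA l kws, l))) (fun x => x.1) true).filter
          (fun x => decide (2 ≤ x.1) && decide (x.1 ≤ (kws.length : Int))) := by
      apply List.filter_congr
      intro x hx
      have hx' : x ∈ wl.map (fun l => (matchScoreA l kws, l)) := (PySem.List.mem_sorted _ _ _ _).mp hx
      rcases List.mem_map.mp hx' with ⟨l, _, rfl⟩
      have := (matchScoreA_bounds l kws).2
      by_cases h2 : 2 ≤ matchScoreA l kws
      · simp [h2]; omega
      · simp [h2]
    rw [hcong, filter_ge2_eq_flatMap kws.length _ hpair, List.map_flatMap]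
    apply List.flatMap_congr
    intro s _
    rw [class_eq, hbuck]
  · -- indirect
    rw [show ((PySem.List.sorted (wl.map (fun l => (matchScoreA l kws, l))) (fun x => x.1) true).filter
          (fun x => decide (0 < x.1) && decide (x.1 < 2))) =
        ((PySem.List.sorted (wl.map (fun l => (matchScoreA l kws, l))) (fun x => x.1) true).filter
          (fun x => x.1 == 1)) from List.filter_congr (by intro x _; exact indirect_cond x.1)]
    rw [class_eq, hbuck]
  · -- standard
    rw [class_eq, hbuck]
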